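-- pv_equiv track=rewrite | github.com/wuzengding/TRANSAID | Encoding_structure2.py | find_poly_a
-- ===== SOURCE A (Python) =====
-- def find_poly_a(sequence, min_length=4):
--     """Find polyA sequence at the end (3' end)"""
--     count = 0
--     # 从序列的末尾开始向前遍历
--     for base in reversed(sequence):
--         if base.upper() == 'A':
--             count += 1
--         else:
--             break
--     return sequence[-count:] if count >= min_length else ""
-- ===== SOURCE B (Python) =====
-- def find_poly_a(sequence, min_length=4):
--     """Find polyA sequence at the end (3' end)"""
--     run = 0
--     for base in sequence:
--         run = run + 1 if base in 'Aa' else 0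
--     return sequence[-run:] if run >= min_length else ""
-- ===== Notes on version B (the rewrite author's own statement) =====
-- stated objective: alternative
-- what changed: B scans FORWARD over the whole sequence with a streaming run-length accumulator that resets to 0 on every non-A base (so it ends holding the trailing run), instead of A's backward iteration with an early break; no reversed() and no early exit.
import Mathlib
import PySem

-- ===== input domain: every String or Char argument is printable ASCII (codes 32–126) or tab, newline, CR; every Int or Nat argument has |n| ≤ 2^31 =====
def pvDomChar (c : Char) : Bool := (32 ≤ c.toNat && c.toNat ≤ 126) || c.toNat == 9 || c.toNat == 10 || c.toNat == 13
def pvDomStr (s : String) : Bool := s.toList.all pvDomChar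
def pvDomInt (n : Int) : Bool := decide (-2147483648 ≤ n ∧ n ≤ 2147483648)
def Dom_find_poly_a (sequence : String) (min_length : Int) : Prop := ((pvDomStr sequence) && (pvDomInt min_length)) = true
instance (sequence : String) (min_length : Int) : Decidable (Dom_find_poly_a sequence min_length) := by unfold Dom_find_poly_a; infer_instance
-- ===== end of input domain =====

-- B scans forward with a run-length accumulator that resets on every non-A base,
-- instead of A's backward early-break loop (objective: alternative); same return values.

-- ===== PORT A =====
-- the `for base in reversed(sequence): if base.upper() == 'A': count += 1 else: break` loop
def pvCountLoop : List Char → Nat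
  | [] => 0
  | c :: rest => if PySem.Chars.upperChar c = 'A' then pvCountLoop rest + 1 else 0

def find_poly_a (sequence : String) (min_length : Int) : String :=
  let count : Nat := pvCountLoop sequence.toList.reverse
  if min_length ≤ (count : Int) then PySem.Str.slice sequence (some (-(count : Int))) none else ""

-- ===== PORT B =====
-- forward pass: `for base in sequence: run = run + 1 if base in 'Aa' else 0`
def find_poly_a_alt (sequence : String) (min_length : Int) : String :=
  let run : Nat := sequence.toList.foldl (fun r c => if c = 'A' || c = 'a' then r + 1 else 0) 0
  if min_length ≤ (run : Int) then PySem.Str.slice sequence (some (-(run : Int))) none else ""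

-- ===== PRECONDITION & SPEC =====
def Spec_find_poly_a (sequence : String) (min_length : Int) (out : String) : Prop := out = find_poly_a_alt sequence min_length
instance (sequence : String) (min_length : Int) (out : String) : Decidable (Spec_find_poly_a sequence min_length out) := by unfold Spec_find_poly_a; infer_instance

-- ===== CLAIM (what is proved, stated in full; the proofs are below) =====
def Claim_equal_find_poly_a : Prop := ∀ (sequence : String) (min_length : Int), Dom_find_poly_a sequence min_length → Spec_find_poly_a sequence min_length (find_poly_a sequence min_length)

-- ===== LEMMAS AND PROOFS =====

theorem pv_upperChar_eq_A (c : Char) :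
    (PySem.Chars.upperChar c = 'A') ↔ (c = 'A' ∨ c = 'a') := by
  unfold PySem.Chars.upperChar
  by_cases hl : PySem.Chars.islower c = true
  · rw [if_pos hl]
    have hn : 97 ≤ c.toNat ∧ c.toNat ≤ 122 := by
      unfold PySem.Chars.islower at hl
      simp [Char.le_def, UInt32.le_iff_toNat_le] at hl
      exact hl
    have hval : (c.toNat - 32).isValidChar := Or.inl (by omega)
    have htn : (Char.ofNat (c.toNat - 32)).toNat = c.toNat - 32 := by
      rw [Char.ofNat, dif_pos hval]; exact Char.toNat_ofNatAux hval
    constructor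
    · intro h
      have h65 : c.toNat - 32 = 65 := by rw [← htn, h]; rfl
      have hc : c.toNat = ('a' : Char).toNat := by
        have : ('a' : Char).toNat = 97 := rfl
        omega
      exact Or.inr (Char.ext (UInt32.toNat_inj.mp hc))
    · rintro (rfl | rfl)
      · exact absurd hn (by decide)
      · decide
  · rw [if_neg hl]
    constructor
    · exact fun h => Or.inl h
    · rintro (rfl | rfl)
      · rfl
      · exact absurd (by decide) hl

-- the forward streaming accumulator ends with exactly the length of the trailing A-run
theorem pv_foldl_eq_countLoop (l : List Char) :
    l.foldl (fun r c => if c = 'A' || c = 'a' then r + 1 else 0) 0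
      = pvCountLoop l.reverse := by
  induction l using List.reverseRecOn with
  | nil => rfl
  | append_singleton l c ih =>
    rw [List.foldl_append, List.reverse_append]
    simp only [List.foldl_cons, List.foldl_nil, List.reverse_singleton, List.singleton_append,
      pvCountLoop, ih]
    by_cases h : PySem.Chars.upperChar c = 'A'
    · have hc : (c = 'A' || c = 'a') = true := by
        rcases (pv_upperChar_eq_A c).mp h with rfl | rfl <;> decide
      simp [h, hc]
    · have hc : (c = 'A' || c = 'a') = false := by
        simp only [Bool.or_eq_false_iff, decide_eq_false_iff_not]
        exact ⟨fun hx => h ((pv_upperChar_eq_A c).mpr (Or.inl hx)),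
              fun hx => h ((pv_upperChar_eq_A c).mpr (Or.inr hx))⟩
      simp [h, hc]

-- ===== VERDICT (by name: the statement is the Claim_ definition above) =====
theorem find_poly_a_spec : Claim_equal_find_poly_a := by
  intro sequence min_length _
  unfold Spec_find_poly_a find_poly_a find_poly_a_alt
  dsimp only
  rw [pv_foldl_eq_countLoop]
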